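-- pv_equiv track=rewrite | github.com/mhdrizwan95-netizen/iptvmal | scripts/generate_malayalam_channels.py | index_guides_by_channel
-- ===== SOURCE A (Python) =====
-- from typing import Iterable, Mapping, Sequence
--
-- def index_guides_by_channel(guides: Iterable[Mapping[str, object]]) -> dict[str, list[Mapping[str, object]]]:
--     """Return a mapping of channel id to its guide entries."""
--
--     by_channel: dict[str, list[Mapping[str, object]]] = {}
--     for guide in guides:
--         channel_id = guide.get("channel")
--         if not channel_id:
--             continue
--         by_channel.setdefault(str(channel_id), []).append(guide)
--     return by_channel
-- ===== SOURCE B (Python) =====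
-- from typing import Iterable, Mapping
--
-- def index_guides_by_channel(guides: Iterable[Mapping[str, object]]) -> dict[str, list[Mapping[str, object]]]:
--     """Return a mapping of channel id to its guide entries."""
--     guides = list(guides)
--
--     def key(guide):
--         channel_id = guide.get("channel")
--         return str(channel_id) if channel_id else None
--
--     keys: list[str] = []
--     for guide in guides:
--         k = key(guide)
--         if k is not None and k not in keys:
--             keys.append(k)
--     return {k: [g for g in guides if key(g) == k] for k in keys}
-- ===== Notes on version B (the rewrite author's own statement) =====
-- stated objective: alternative
-- what changed: B replaces A's single-pass dict setdefault/append accumulation with a two-phase algorithm: one pass collects the distinct channel keys in first-occurrence order, then each group is built by filtering the whole guide list per key; it trades A's O(n) single pass for O(k*n) filtering.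
import Mathlib
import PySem

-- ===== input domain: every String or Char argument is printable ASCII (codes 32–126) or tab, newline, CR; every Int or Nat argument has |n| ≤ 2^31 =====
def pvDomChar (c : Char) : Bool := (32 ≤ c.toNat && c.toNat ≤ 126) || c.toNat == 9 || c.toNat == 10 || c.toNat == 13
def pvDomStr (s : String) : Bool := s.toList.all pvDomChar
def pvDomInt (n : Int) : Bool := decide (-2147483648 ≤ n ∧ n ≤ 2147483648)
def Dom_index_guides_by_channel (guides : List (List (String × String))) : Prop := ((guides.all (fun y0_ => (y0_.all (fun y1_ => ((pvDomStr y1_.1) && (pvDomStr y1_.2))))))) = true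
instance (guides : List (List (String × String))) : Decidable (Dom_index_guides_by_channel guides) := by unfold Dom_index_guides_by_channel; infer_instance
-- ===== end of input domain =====

-- B groups guides by channel id with a two-phase algorithm (collect distinct keys in first-occurrence
-- order, then filter the list once per key) instead of A's single setdefault/append dict pass;
-- objective: alternative (not faster).

-- ===== PORT A =====
-- one loop over guides accumulating a dict; setdefault(k, []).append(guide) is the single
-- dict update d[k] = d.get(k, []) + [guide] at k's position, i.e. PySem.Dict.modify
def aStep (d : PySem.Dict String (List (List (String × String)))) (guide : List (String × String)) :
    PySem.Dict String (List (List (String × String))) :=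
  match (PySem.Dict.mk guide).get? "channel" with
  | none => d                                  -- missing key: falsy, continue
  | some c => if c = "" then d                 -- empty string: falsy, continue
              else d.modify c [] (· ++ [guide])  -- str(c) = c for a string value

def index_guides_by_channel (guides : List (List (String × String))) : List (String × List (List (String × String))) :=
  (guides.foldl aStep PySem.Dict.empty).items

-- ===== PORT B =====
-- key(guide): the truthy channel id as a string, else None
def bKey (guide : List (String × String)) : Option String :=
  match (PySem.Dict.mk guide).get? "channel" with
  | none => none
  | some c => if c = "" then none else some c

-- first pass: distinct keys in first-occurrence order
def bKeyStep (ks : List String) (guide : List (String × String)) : List String :=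
  match bKey guide with
  | none => ks
  | some k => if k ∈ ks then ks else ks ++ [k]

def index_guides_by_channel_alt (guides : List (List (String × String))) : List (String × List (List (String × String))) :=
  (guides.foldl bKeyStep []).map
    (fun k => (k, guides.filter (fun g => bKey g == some k)))

-- ===== PRECONDITION & SPEC =====
def Spec_index_guides_by_channel (guides : List (List (String × String))) (out : List (String × List (List (String × String)))) : Prop := out = index_guides_by_channel_alt guides
instance (guides : List (List (String × String))) (out : List (String × List (List (String × String)))) : Decidable (Spec_index_guides_by_channel guides out) := by unfold Spec_index_guides_by_channel; infer_instance

-- ===== CLAIM (what is proved, stated in full; the proofs are below) =====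
def Claim_equal_index_guides_by_channel : Prop := ∀ (guides : List (List (String × String))), Dom_index_guides_by_channel guides → Spec_index_guides_by_channel guides (index_guides_by_channel guides)

-- ===== LEMMAS AND PROOFS =====

-- aStep rewritten through bKey (same branches, one match)
theorem aStep_eq (d : PySem.Dict String (List (List (String × String)))) (g : List (String × String)) :
    aStep d g = match bKey g with
                | none => d
                | some k => d.modify k [] (· ++ [g]) := by
  unfold aStep bKey
  cases (PySem.Dict.mk g).get? "channel" with
  | none => rfl
  | some c => by_cases h : c = "" <;> simp [h]

-- the keys of A's accumulated dict follow B's key fold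
theorem keys_foldl_aStep (l : List (List (String × String)))
    (d : PySem.Dict String (List (List (String × String)))) :
    (l.foldl aStep d).keys = l.foldl bKeyStep d.keys := by
  induction l generalizing d with
  | nil => rfl
  | cons g l ih =>
    simp only [List.foldl_cons]
    rw [ih]
    congr 1
    rw [aStep_eq]
    unfold bKeyStep
    cases bKey g with
    | none => rfl
    | some k =>
      simp only
      rw [PySem.Dict.keys_modify]
      by_cases hk : k ∈ d.keys
      · rw [PySem.Dict.keys_insert_of_contains, if_pos hk]
        rw [PySem.Dict.contains_eq_decide_mem_keys]; simp [hk]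
      · rw [PySem.Dict.keys_insert_of_not_contains, if_neg hk]
        rw [PySem.Dict.contains_eq_decide_mem_keys]; simp [hk]

-- B's key fold keeps the key list duplicate-free
theorem nodup_foldl_bKeyStep (l : List (List (String × String))) (ks : List String)
    (h : ks.Nodup) : (l.foldl bKeyStep ks).Nodup := by
  induction l generalizing ks with
  | nil => exact h
  | cons g l ih =>
    simp only [List.foldl_cons]
    apply ih
    unfold bKeyStep
    cases bKey g with
    | none => exact h
    | some k =>
      simp only
      by_cases hk : k ∈ ks
      · simp [hk, h]
      · simp [hk, List.nodup_append, h]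
        exact fun a ha he => hk (he ▸ ha)

-- each entry of A's dict is the filter of the guides processed so far
theorem getD_foldl_aStep (l : List (List (String × String)))
    (d : PySem.Dict String (List (List (String × String)))) (k : String) :
    (l.foldl aStep d).getD k [] = d.getD k [] ++ l.filter (fun g => bKey g == some k) := by
  induction l generalizing d with
  | nil => simp
  | cons g l ih =>
    simp only [List.foldl_cons, List.filter_cons]
    rw [ih, aStep_eq]
    cases hb : bKey g with
    | none => simp
    | some k0 =>
      simp only
      rw [PySem.Dict.getD_modify]
      by_cases hk : k = k0
      · subst hk; simp
      · simp [hk]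
        exact fun h => hk h.symm

-- ===== VERDICT (by name: the statement is the Claim_ definition above) =====
theorem index_guides_by_channel_spec : Claim_equal_index_guides_by_channel := by
  intro guides _
  unfold Spec_index_guides_by_channel index_guides_by_channel index_guides_by_channel_alt
  have hkeys : (guides.foldl aStep PySem.Dict.empty).keys = guides.foldl bKeyStep [] := by
    rw [keys_foldl_aStep, PySem.Dict.keys_empty]
  have hnd : (guides.foldl aStep PySem.Dict.empty).keys.Nodup := by
    rw [hkeys]; exact nodup_foldl_bKeyStep _ _ List.nodup_nil
  rw [PySem.Dict.items_eq_map_keys _ hnd [], hkeys]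
  apply List.map_congr_left
  intro k _
  rw [getD_foldl_aStep]
  simp [PySem.Dict.getD_empty]
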